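-- pv_equiv track=rewrite | github.com/ZhenfengSu/FreqAgent | Information_Gain/ig_calculator.py | parse_rounds_from_messages
-- ===== SOURCE A (Python) =====
-- from typing import List, Dict, Any, Optional
--
-- def parse_rounds_from_messages(messages: List[Dict]) -> List[List[Dict]]:
--     """
--     从 messages 中解析每一轮的上下文
--     一轮定义为：到 tool_response 结束
--     返回：每轮结束时的完整上下文列表
--     """
--     rounds = []
--     current_round_end_indices = []
--
--     for i, msg in enumerate(messages):
--         # 检查是否是 tool_response（标志一轮结束）
--         if msg.get('role') == 'user':
--             content = msg.get('content', '')
--             if '<tool_response>' in content or content.startswith('<tool_response>'):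
--                 current_round_end_indices.append(i)
--
--         # 或者检查 assistant 给出最终答案
--         if msg.get('role') == 'assistant':
--             content = msg.get('content', '')
--             if '<answer>' in content and '</answer>' in content:
--                 # 最后一轮
--                 current_round_end_indices.append(i)
--
--     # 构建每轮的上下文
--     for end_idx in current_round_end_indices:
--         # 上下文包含从开始到该轮结束的所有消息
--         context = messages[:end_idx + 1]
--         rounds.append(context)
--
--     # 如果没有找到任何轮次，至少返回完整的 messages
--     if not rounds and messages:
--         rounds.append(messages)
--
--     return rounds
-- ===== SOURCE B (Python) =====
-- def parse_rounds_from_messages(messages):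
--     """Single pass with a growing prefix accumulator: snapshot the prefix at
--     every round-end message; no index list, no slicing."""
--     rounds = []
--     prefix = []
--     for msg in messages:
--         prefix = prefix + [msg]
--         role = msg.get('role')
--         content = msg.get('content', '')
--         if (role == 'user' and '<tool_response>' in content) or \
--            (role == 'assistant' and '<answer>' in content and '</answer>' in content):
--             rounds.append(prefix)
--     return rounds or ([messages] if messages else [])
-- ===== Notes on version B (the rewrite author's own statement) =====
-- stated objective: simpler
-- what changed: Replaces A's two-phase scheme (collect end indices, then re-slice messages[:i+1] for each) by one pass that maintains the growing prefix itself and snapshots it at each round-end message, folding A's two ifs into one condition and dropping the redundant startswith check.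
import Mathlib
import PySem

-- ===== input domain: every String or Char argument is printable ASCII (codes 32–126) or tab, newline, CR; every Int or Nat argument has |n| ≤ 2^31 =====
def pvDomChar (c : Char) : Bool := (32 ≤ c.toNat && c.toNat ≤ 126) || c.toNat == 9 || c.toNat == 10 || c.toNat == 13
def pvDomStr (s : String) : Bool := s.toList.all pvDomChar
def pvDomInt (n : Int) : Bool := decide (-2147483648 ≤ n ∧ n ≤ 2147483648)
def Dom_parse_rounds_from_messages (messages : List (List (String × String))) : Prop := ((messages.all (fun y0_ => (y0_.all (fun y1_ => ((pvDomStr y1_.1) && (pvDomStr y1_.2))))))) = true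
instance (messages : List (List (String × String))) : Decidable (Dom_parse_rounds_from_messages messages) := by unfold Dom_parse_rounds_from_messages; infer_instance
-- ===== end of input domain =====

-- B replaces A's two-phase scheme (collect round-end indices, then slice messages[:i+1] for each)
-- by one pass maintaining the growing prefix itself; objective: simpler.

-- ===== PORT A =====
def parse_rounds_from_messages (messages : List (List (String × String))) : List (List (List (String × String))) :=
  -- first loop: collect current_round_end_indices
  let idxs : List Int := (PySem.List.enumerate messages).foldl (fun acc im =>
    let i := im.1
    let msg := im.2
    let acc :=
      if (PySem.Dict.mk msg).get? "role" == some "user" then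
        let content := (PySem.Dict.mk msg).getD "content" ""
        if PySem.Str.isIn "<tool_response>" content || PySem.Str.startswith content "<tool_response>" then
          acc ++ [i]
        else acc
      else acc
    if (PySem.Dict.mk msg).get? "role" == some "assistant" then
      let content := (PySem.Dict.mk msg).getD "content" ""
      if PySem.Str.isIn "<answer>" content && PySem.Str.isIn "</answer>" content then
        acc ++ [i]
      else acc
    else acc) []
  -- second loop: build each context by slicing
  let rounds := idxs.foldl (fun rs i => rs ++ [PySem.List.slice messages none (some (i + 1))]) []
  if rounds.isEmpty && !messages.isEmpty then rounds ++ [messages] else rounds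

-- ===== PORT B =====
def pvAltRoundEnd (msg : List (String × String)) : Bool :=
  let role := (PySem.Dict.mk msg).get? "role"
  let content := (PySem.Dict.mk msg).getD "content" ""
  (role == some "user" && PySem.Str.isIn "<tool_response>" content) ||
  (role == some "assistant" && PySem.Str.isIn "<answer>" content && PySem.Str.isIn "</answer>" content)

def parse_rounds_from_messages_alt (messages : List (List (String × String))) : List (List (List (String × String))) :=
  let st := messages.foldl
    (fun (st : List (List (String × String)) × List (List (List (String × String)))) msg =>
      let pre := st.1 ++ [msg]
      (pre, if pvAltRoundEnd msg then st.2 ++ [pre] else st.2))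
    ([], [])
  let rounds := st.2
  if rounds.isEmpty then (if messages.isEmpty then [] else [messages]) else rounds

-- ===== PRECONDITION & SPEC =====
def Spec_parse_rounds_from_messages (messages : List (List (String × String))) (out : List (List (List (String × String)))) : Prop := out = parse_rounds_from_messages_alt messages
instance (messages : List (List (String × String))) (out : List (List (List (String × String)))) : Decidable (Spec_parse_rounds_from_messages messages out) := by unfold Spec_parse_rounds_from_messages; infer_instance

-- ===== CLAIM (what is proved, stated in full; the proofs are below) =====
def Claim_equal_parse_rounds_from_messages : Prop := ∀ (messages : List (List (String × String))), Dom_parse_rounds_from_messages messages → Spec_parse_rounds_from_messages messages (parse_rounds_from_messages messages)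

-- ===== LEMMAS AND PROOFS =====

-- the contexts collected from suffix ms when the already-consumed prefix is pre
def pvCollect (pre : List (List (String × String))) :
    List (List (String × String)) → List (List (List (String × String)))
  | [] => []
  | m :: ms => (if pvAltRoundEnd m then [pre ++ [m]] else []) ++ pvCollect (pre ++ [m]) ms

-- the indices collected from suffix ms when enumeration starts at k
def pvCollectIdx (k : Nat) : List (List (String × String)) → List Int
  | [] => []
  | m :: ms => (if pvAltRoundEnd m then [(k : Int)] else []) ++ pvCollectIdx (k + 1) ms

theorem pvStarts_absorb (content : String) :
    (PySem.Str.isIn "<tool_response>" content || PySem.Str.startswith content "<tool_response>") =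
    PySem.Str.isIn "<tool_response>" content := by
  cases h : PySem.Str.startswith content "<tool_response>" with
  | false => simp
  | true =>
    have hp : ("<tool_response>".toList) <+: content.toList :=
      (PySem.Chars.startswith_iff content.toList "<tool_response>".toList).mp (by simpa using h)
    have hin : PySem.Str.isIn "<tool_response>" content = true := by
      rw [PySem.Str.isIn_iff_infix]; exact hp.isInfix
    rw [hin]; simp

-- A's loop body (two sequential ifs) appends i exactly when pvAltRoundEnd fires
theorem pvBodyEq (acc : List Int) (i : Int) (msg : List (String × String)) :
    (let acc :=
      if (PySem.Dict.mk msg).get? "role" == some "user" then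
        let content := (PySem.Dict.mk msg).getD "content" ""
        if PySem.Str.isIn "<tool_response>" content || PySem.Str.startswith content "<tool_response>" then
          acc ++ [i]
        else acc
      else acc
     if (PySem.Dict.mk msg).get? "role" == some "assistant" then
      let content := (PySem.Dict.mk msg).getD "content" ""
      if PySem.Str.isIn "<answer>" content && PySem.Str.isIn "</answer>" content then
        acc ++ [i]
      else acc
     else acc) = if pvAltRoundEnd msg then acc ++ [i] else acc := by
  simp only [pvAltRoundEnd, pvStarts_absorb]
  by_cases hr : (PySem.Dict.mk msg).get? "role" = some "user"
  · simp [hr]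
  · by_cases ha : (PySem.Dict.mk msg).get? "role" = some "assistant"
    · have hu : ((PySem.Dict.mk msg).get? "role" == some "user") = false :=
        beq_eq_false_iff_ne.mpr hr
      simp only [ha]
      simp
    · have hu : ((PySem.Dict.mk msg).get? "role" == some "user") = false :=
        beq_eq_false_iff_ne.mpr hr
      have ha' : ((PySem.Dict.mk msg).get? "role" == some "assistant") = false :=
        beq_eq_false_iff_ne.mpr ha
      simp [hu, ha']

theorem pvIdxFold (ms : List (List (String × String))) : ∀ (k : Int) (hk : 0 ≤ k) (acc : List Int),
    (PySem.List.enumerate ms k).foldl (fun acc im =>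
      let i := im.1
      let msg := im.2
      let acc :=
        if (PySem.Dict.mk msg).get? "role" == some "user" then
          let content := (PySem.Dict.mk msg).getD "content" ""
          if PySem.Str.isIn "<tool_response>" content || PySem.Str.startswith content "<tool_response>" then
            acc ++ [i]
          else acc
        else acc
      if (PySem.Dict.mk msg).get? "role" == some "assistant" then
        let content := (PySem.Dict.mk msg).getD "content" ""
        if PySem.Str.isIn "<answer>" content && PySem.Str.isIn "</answer>" content then
          acc ++ [i]
        else acc
      else acc) acc = acc ++ pvCollectIdx k.toNat ms := by
  induction ms with
  | nil => intro k _hk acc; simp [PySem.List.enumerate_nil, pvCollectIdx]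
  | cons m ms ih =>
    intro k hk acc
    rw [PySem.List.enumerate_cons, List.foldl_cons]
    rw [pvBodyEq acc k m]
    rw [ih (k + 1) (by omega)]
    have hto : (k + 1).toNat = k.toNat + 1 := by omega
    rw [hto]
    cases h : pvAltRoundEnd m <;>
      simp [pvCollectIdx, h, Int.toNat_of_nonneg hk, List.append_assoc]

theorem pvLink (ms : List (List (String × String))) :
    ∀ (pre : List (List (String × String))),
    (pvCollectIdx pre.length ms).map
      (fun i => PySem.List.slice (pre ++ ms) none (some (i + 1))) = pvCollect pre ms := by
  induction ms with
  | nil => intro pre; simp [pvCollectIdx, pvCollect]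
  | cons m ms ih =>
    intro pre
    have hslice : PySem.List.slice (pre ++ m :: ms) none (some ((pre.length : Int) + 1)) = pre ++ [m] := by
      have : ((pre.length : Int) + 1) = ((pre.length + 1 : Nat) : Int) := by push_cast; ring
      rw [this, PySem.List.slice_to_natCast]
      rw [show pre.length + 1 = pre.length + 1 from rfl, List.take_append]
      simp
    have ih' := ih (pre ++ [m])
    simp only [List.length_append, List.length_cons, List.length_nil] at ih' ⊢
    cases h : pvAltRoundEnd m <;>
      simp_all [pvCollectIdx, pvCollect, List.append_assoc]

theorem pvBFold (ms : List (List (String × String))) :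
    ∀ (pre : List (List (String × String))) (racc : List (List (List (String × String)))),
    ms.foldl
      (fun (st : List (List (String × String)) × List (List (List (String × String)))) msg =>
        let pre := st.1 ++ [msg]
        (pre, if pvAltRoundEnd msg then st.2 ++ [pre] else st.2))
      (pre, racc) = (pre ++ ms, racc ++ pvCollect pre ms) := by
  induction ms with
  | nil => intro pre racc; simp [pvCollect]
  | cons m ms ih =>
    intro pre racc
    rw [List.foldl_cons, ih]
    cases h : pvAltRoundEnd m <;> simp [pvCollect, h, List.append_assoc]

theorem pvMapFold (idxs : List Int) (messages : List (List (String × String)))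
    (racc : List (List (List (String × String)))) :
    idxs.foldl (fun rs i => rs ++ [PySem.List.slice messages none (some (i + 1))]) racc =
      racc ++ idxs.map (fun i => PySem.List.slice messages none (some (i + 1))) := by
  induction idxs generalizing racc with
  | nil => simp
  | cons i idxs ih => simp [ih, List.append_assoc]

theorem pvMain (messages : List (List (String × String))) :
    parse_rounds_from_messages messages = parse_rounds_from_messages_alt messages := by
  unfold parse_rounds_from_messages parse_rounds_from_messages_alt
  dsimp only
  rw [pvIdxFold messages 0 le_rfl [], pvMapFold, pvBFold]
  have hlink := pvLink messages []
  simp only [List.length_nil, List.nil_append] at hlink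
  simp only [List.nil_append, show (0 : Int).toNat = 0 from rfl]
  rw [hlink]
  cases h : (pvCollect [] messages).isEmpty <;> cases hm : messages.isEmpty <;>
    simp_all [List.isEmpty_iff]

-- ===== VERDICT (by name: the statement is the Claim_ definition above) =====
theorem parse_rounds_from_messages_spec : Claim_equal_parse_rounds_from_messages := by
  intro messages _
  unfold Spec_parse_rounds_from_messages
  exact pvMain messages
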